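-- pv_equiv track=rewrite | github.com/darengit/thinkdeep | utils/graph/__init__.py | upside_down_pivots
-- ===== SOURCE A (Python) =====
-- def upside_down_pivots(dates, highs, lows):
--     (idx, high_or_low) = next_pivot(dates, highs, lows)
--
--     if idx is not None:
--         (high_pivots, low_pivots) = upside_down_pivots(dates[idx:], highs[idx:], lows[idx:])
--         if high_or_low is "high":
--             high_pivots[dates[idx]] = lows[idx]
--         else:
--             low_pivots[dates[idx]] = highs[idx]
--         return (high_pivots, low_pivots)
--     else:
--         return ({}, {})
--
-- def next_pivot(dates, highs, lows):
--     length = len(dates)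
--
--     #highest_high_iidx = 0
--     #highest_high = highs[highest_high_idx]
--
--     lowest_high_idx = 0
--     lowest_high = highs[lowest_high_idx]
--
--     highest_low_idx = 0
--     highest_low = lows[highest_low_idx]
--
--     #lowest_low_idx = 0
--     #lowest_low = lows[lowest_low_idx]
--
--     i=1
--     while i<length:
--         if highest_low > highs[i] and highest_low > highs[0]:
--             return (highest_low_idx, "high")
--         if lowest_high < lows[i] and lowest_high < lows[0]:
--             return (lowest_high_idx, "low")
--
--         #if highest_high < highs[i]:
--             #highest_high = highs[i]
--             #highest_high_idx = i
--         if lowest_high > highs[i]: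
--             lowest_high = highs[i]
--             lowest_high_idx = i
--         if highest_low < lows[i]:
--             highest_low = lows[i]
--             highest_low_idx = i
--         #if lowest_low > lows[i]:
--             #lowest_low = lows[i]
--             #lowest_low_idx = i
--
--         i += 1
--
--     return (None, None)
-- ===== SOURCE B (Python) =====
-- def upside_down_pivots(dates, highs, lows):
--     n = len(dates)
--     # collect the chain of pivots left-to-right, passing an absolute start
--     # index instead of slicing; only pivot *indices* are maintained.
--     pivots = []
--     start = 0
--     while True:
--         p = _find_pivot_from(dates, highs, lows, start)
--         if p is None:
--             break
--         (j, kind) = p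
--         pivots.append((j, kind))
--         start = j
--     # the recursive version inserts deepest-first: build both dicts in one
--     # reversed pass over the collected chain.
--     high_pivots = {}
--     low_pivots = {}
--     for (j, kind) in reversed(pivots):
--         if kind == "high":
--             high_pivots[dates[j]] = lows[j]
--         else:
--             low_pivots[dates[j]] = highs[j]
--     return (high_pivots, low_pivots)
--
-- def _find_pivot_from(dates, highs, lows, start):
--     n = len(dates)
--     lh = start  # index of the first lowest high seen since start
--     hl = start  # index of the first highest low seen since start
--     i = start + 1
--     while i < n:
--         if lows[hl] > highs[i] and lows[hl] > highs[start]: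
--             return (hl, "high")
--         if highs[lh] < lows[i] and highs[lh] < lows[start]:
--             return (lh, "low")
--         if highs[lh] > highs[i]:
--             lh = i
--         if lows[hl] < lows[i]:
--             hl = i
--         i += 1
--     return None
-- ===== Notes on version B (the rewrite author's own statement) =====
-- stated objective: alternative
-- what changed: Replaces A's recursion that slices all three lists at every pivot with a single iterative loop that passes an absolute start index, collects the pivot chain into a list, and builds both dicts in one reversed pass (no list copies, no recursion); it maintains candidate indices instead of cached values.
-- outside the precondition, e.g. on upside_down_pivots([0, 1, 2], [5, 0, 9], [0, 6, 5]): A returns ({}, {}), B returns ({}, {})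
import Mathlib
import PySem

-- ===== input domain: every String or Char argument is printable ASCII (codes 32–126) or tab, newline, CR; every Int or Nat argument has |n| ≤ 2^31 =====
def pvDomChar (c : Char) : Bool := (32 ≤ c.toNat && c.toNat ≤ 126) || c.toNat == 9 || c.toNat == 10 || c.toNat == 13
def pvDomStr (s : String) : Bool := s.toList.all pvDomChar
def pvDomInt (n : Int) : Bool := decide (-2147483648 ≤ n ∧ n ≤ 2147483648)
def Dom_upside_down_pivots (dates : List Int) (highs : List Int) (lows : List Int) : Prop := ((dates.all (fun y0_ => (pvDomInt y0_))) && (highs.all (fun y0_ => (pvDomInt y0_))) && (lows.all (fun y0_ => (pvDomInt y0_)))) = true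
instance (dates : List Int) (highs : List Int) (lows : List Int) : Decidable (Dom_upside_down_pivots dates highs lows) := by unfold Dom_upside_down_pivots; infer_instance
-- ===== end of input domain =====

-- B replaces A's recursion-with-slicing by a single iterative pass that carries an
-- absolute start index and collects the pivot chain, then builds both dicts in one
-- reversed pass (objective: alternative — no per-pivot list copies, no recursion).

-- ===== PORT A =====
-- xs[i] for the Nat loop indices of A; exact for in-range i (out-of-range is a Python
-- IndexError, excluded by Pre_; the default 0 is never reached inside Pre_).
def pvGetI (xs : List Int) (i : Nat) : Int := xs.getD i 0

-- the `while i < length` loop of next_pivot, carrying its four state variables;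
-- structural recursion on the remaining iteration count length - i
def npLoop (highs lows : List Int) : Nat → Nat → Nat → Int → Nat → Int → Option (Nat × String)
  | 0, _, _, _, _, _ => none
  | rem + 1, i, lhIdx, lh, hlIdx, hl =>
    if hl > pvGetI highs i ∧ hl > pvGetI highs 0 then some (hlIdx, "high")
    else if lh < pvGetI lows i ∧ lh < pvGetI lows 0 then some (lhIdx, "low")
    else
      npLoop highs lows rem (i + 1)
        (if lh > pvGetI highs i then i else lhIdx)
        (if lh > pvGetI highs i then pvGetI highs i else lh)
        (if hl < pvGetI lows i then i else hlIdx)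
        (if hl < pvGetI lows i then pvGetI lows i else hl)

-- next_pivot(dates, highs, lows); 'some (idx, kind)' stands for Python's (idx, "high"/"low"),
-- 'none' for (None, None)
def nextPivot (highs lows : List Int) (length : Nat) : Option (Nat × String) :=
  npLoop highs lows (length - 1) 1 0 (pvGetI highs 0) 0 (pvGetI lows 0)

-- the unbounded Python recursion, totalised with fuel; inside Pre_ every returned idx is
-- ≥ 1, so fuel = len(dates)+1 is never exhausted (outside Pre_ Python diverges)
def udpGo : Nat → List Int → List Int → List Int → PySem.Dict Int Int × PySem.Dict Int Int
  | 0, _, _, _ => (PySem.Dict.empty, PySem.Dict.empty)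
  | fuel + 1, dates, highs, lows =>
    match nextPivot highs lows dates.length with
    | some (idx, hol) =>
      let r := udpGo fuel (dates.drop idx) (highs.drop idx) (lows.drop idx)
      if hol == "high" then (r.1.insert (pvGetI dates idx) (pvGetI lows idx), r.2)
      else (r.1, r.2.insert (pvGetI dates idx) (pvGetI highs idx))
    | none => (PySem.Dict.empty, PySem.Dict.empty)

def upside_down_pivots (dates : List Int) (highs : List Int) (lows : List Int) :
    (List (Int × Int)) × (List (Int × Int)) :=
  let r := udpGo (dates.length + 1) dates highs lows
  (r.1.items, r.2.items)

-- ===== PORT B =====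
-- the `while i < n` scan of _find_pivot_from: only the two candidate *indices* are
-- carried; structural recursion on the remaining iteration count n - i
def fpLoop (highs lows : List Int) (start : Nat) : Nat → Nat → Nat → Nat → Option (Nat × String)
  | 0, _, _, _ => none
  | rem + 1, lh, hl, i =>
    if pvGetI lows hl > pvGetI highs i ∧ pvGetI lows hl > pvGetI highs start then some (hl, "high")
    else if pvGetI highs lh < pvGetI lows i ∧ pvGetI highs lh < pvGetI lows start then some (lh, "low")
    else
      fpLoop highs lows start rem
        (if pvGetI highs lh > pvGetI highs i then i else lh)
        (if pvGetI lows hl < pvGetI lows i then i else hl) (i + 1)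

def findPivotFrom (dates highs lows : List Int) (start : Nat) : Option (Nat × String) :=
  fpLoop highs lows start (dates.length - (start + 1)) start start (start + 1)

-- B's outer `while True` loop, collecting the pivot chain; fuel as in port A
def collectPivots : Nat → List Int → List Int → List Int → Nat → List (Nat × String)
  | 0, _, _, _, _ => []
  | fuel + 1, dates, highs, lows, start =>
    match findPivotFrom dates highs lows start with
    | some (j, kind) => (j, kind) :: collectPivots fuel dates highs lows j
    | none => []

-- one step of B's `for (j, kind) in reversed(pivots)` dict-building loop
def pivotStep (dates highs lows : List Int) (acc : PySem.Dict Int Int × PySem.Dict Int Int)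
    (jk : Nat × String) : PySem.Dict Int Int × PySem.Dict Int Int :=
  if jk.2 == "high" then (acc.1.insert (pvGetI dates jk.1) (pvGetI lows jk.1), acc.2)
  else (acc.1, acc.2.insert (pvGetI dates jk.1) (pvGetI highs jk.1))

def upside_down_pivots_alt (dates : List Int) (highs : List Int) (lows : List Int) :
    (List (Int × Int)) × (List (Int × Int)) :=
  let pivots := collectPivots (dates.length + 1) dates highs lows 0
  let r := pivots.reverse.foldl (pivotStep dates highs lows)
    (PySem.Dict.empty, PySem.Dict.empty)
  (r.1.items, r.2.items)

-- ===== PRECONDITION & SPEC =====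
-- Pre_ excludes (a) inputs where Python A raises IndexError (highs/lows empty or shorter
-- than dates: A's scan reads highs[i], lows[i] for every i < len(dates) before it can
-- return), and (b) inputs containing an "inverted" bar s (lows[s] > highs[s]) that some
-- later bar crosses: whenever the recursion reaches such an s it loops on the same start
-- forever (RecursionError); the exact divergent subset is not closed-form, so this
-- condition over-approximates it and also excludes some inputs on which A does return
-- (never reaching the bad bar) — on those A and B agree anyway (see cites).
def Pre_upside_down_pivots (dates : List Int) (highs : List Int) (lows : List Int) : Prop :=
  highs ≠ [] ∧ lows ≠ [] ∧ dates.length ≤ highs.length ∧ dates.length ≤ lows.length ∧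
  ∀ s < dates.length, highs.getD s 0 < lows.getD s 0 →
    ∀ i < dates.length, s < i → lows.getD s 0 ≤ highs.getD i 0 ∧ lows.getD i 0 ≤ highs.getD s 0
instance (dates : List Int) (highs : List Int) (lows : List Int) :
    Decidable (Pre_upside_down_pivots dates highs lows) := by
  unfold Pre_upside_down_pivots; infer_instance

def pvWitness_upside_down_pivots : List Int × List Int × List Int :=
  ([10, 20, 30], [5, 6, 7], [1, 2, 3])

def Spec_upside_down_pivots (dates : List Int) (highs : List Int) (lows : List Int)
    (out : (List (Int × Int)) × (List (Int × Int))) : Prop :=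
  out = upside_down_pivots_alt dates highs lows
instance (dates : List Int) (highs : List Int) (lows : List Int)
    (out : (List (Int × Int)) × (List (Int × Int))) :
    Decidable (Spec_upside_down_pivots dates highs lows out) := by
  unfold Spec_upside_down_pivots; infer_instance

-- ===== CLAIM (what is proved, stated in full; the proofs are below) =====
def Claim_equal_upside_down_pivots : Prop := ∀ (dates : List Int) (highs : List Int) (lows : List Int), Dom_upside_down_pivots dates highs lows → Pre_upside_down_pivots dates highs lows → Spec_upside_down_pivots dates highs lows (upside_down_pivots dates highs lows)

-- ===== LEMMAS AND PROOFS =====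
theorem pvGetI_drop (xs : List Int) (s r : Nat) : pvGetI (xs.drop s) r = pvGetI xs (s + r) := by
  simp [pvGetI, List.getD, List.getElem?_drop]

-- the two scan loops coincide: B's loop at absolute indices equals A's loop on the
-- suffixes, with every returned index shifted by the start s
theorem fp_np (highs lows : List Int) (s : Nat) :
    ∀ rem irel lhr hlr,
    fpLoop highs lows s rem (s + lhr) (s + hlr) (s + irel) =
      (npLoop (highs.drop s) (lows.drop s) rem irel lhr (pvGetI highs (s + lhr)) hlr
        (pvGetI lows (s + hlr))).map (fun p => (s + p.1, p.2)) := by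
  intro rem
  induction rem with
  | zero => intro irel lhr hlr; rfl
  | succ rem ih =>
    intro irel lhr hlr
    rw [fpLoop, npLoop]
    simp only [pvGetI_drop, Nat.add_zero]
    split_ifs <;>
      first
        | rfl
        | (rw [Nat.add_assoc]; exact ih (irel + 1) _ _)

theorem findPivot_shift (dates highs lows : List Int) (s : Nat) :
    findPivotFrom dates highs lows s =
      (nextPivot (highs.drop s) (lows.drop s) (dates.drop s).length).map
        (fun p => (s + p.1, p.2)) := by
  have h := fp_np highs lows s (dates.length - (s + 1)) 1 0 0
  simp only [Nat.add_zero] at h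
  rw [findPivotFrom, h, nextPivot, List.length_drop]
  rw [pvGetI_drop, pvGetI_drop, Nat.add_zero]
  congr 2

-- main correspondence: for EVERY fuel, A's fueled recursion on the suffix at s equals
-- B's dict-building fold over the pivot chain collected from s
theorem go_eq (fuel : Nat) : ∀ (dates highs lows : List Int) (s : Nat),
    udpGo fuel (dates.drop s) (highs.drop s) (lows.drop s) =
      (collectPivots fuel dates highs lows s).reverse.foldl (pivotStep dates highs lows)
        (PySem.Dict.empty, PySem.Dict.empty) := by
  induction fuel with
  | zero => intro dates highs lows s; rfl
  | succ fuel ih =>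
    intro dates highs lows s
    rw [udpGo, collectPivots, findPivot_shift]
    cases hnp : nextPivot (highs.drop s) (lows.drop s) (dates.drop s).length with
    | none => rfl
    | some p =>
      obtain ⟨r, kind⟩ := p
      simp only [Option.map_some]
      have hdrop : ∀ xs : List Int, (List.drop s xs).drop r = xs.drop (s + r) := by
        intro xs; rw [List.drop_drop, Nat.add_comm]
      rw [hdrop, hdrop, hdrop, ih dates highs lows (s + r)]
      rw [List.reverse_cons, List.foldl_append]
      simp only [List.foldl_cons, List.foldl_nil, pivotStep, pvGetI_drop]

-- ===== VERDICT (by name: the statement is the Claim_ definition above) =====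
theorem upside_down_pivots_spec : Claim_equal_upside_down_pivots := by
  intro dates highs lows _hdom _hpre
  unfold Spec_upside_down_pivots upside_down_pivots upside_down_pivots_alt
  have h := go_eq (dates.length + 1) dates highs lows 0
  simp only [List.drop_zero] at h
  rw [h]
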